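-- pv_equiv track=rewrite | github.com/MaraSchulze/AdventOfCode-2015-Python | puzzles/day5.2.py | has_two_pairs
-- ===== SOURCE A (Python) =====
-- def has_two_pairs(s):
--     d = {}
--     for i in range(len(s) - 1):
--         substr = s[i:i + 2]
--         if substr in d and abs(d[substr] - i) >= 2:
--             return True
--         else:
--             d[substr] = i
--     return False
-- ===== SOURCE B (Python) =====
-- def has_two_pairs(s):
--     groups = {}
--     for i in range(len(s) - 1):
--         groups.setdefault(s[i:i + 2], []).append(i)
--     for idxs in groups.values():
--         for a, b in zip(idxs, idxs[1:]):
--             if b - a >= 2: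
--                 return True
--     return False
-- ===== Notes on version B (the rewrite author's own statement) =====
-- stated objective: alternative
-- what changed: A's single interleaved scan with a last-index dict and an inline gap test is replaced by two separate passes: first build a dict mapping each 2-char substring to the list of all its occurrence indices, then scan each group for two adjacent occurrences at distance >= 2.
import Mathlib
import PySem

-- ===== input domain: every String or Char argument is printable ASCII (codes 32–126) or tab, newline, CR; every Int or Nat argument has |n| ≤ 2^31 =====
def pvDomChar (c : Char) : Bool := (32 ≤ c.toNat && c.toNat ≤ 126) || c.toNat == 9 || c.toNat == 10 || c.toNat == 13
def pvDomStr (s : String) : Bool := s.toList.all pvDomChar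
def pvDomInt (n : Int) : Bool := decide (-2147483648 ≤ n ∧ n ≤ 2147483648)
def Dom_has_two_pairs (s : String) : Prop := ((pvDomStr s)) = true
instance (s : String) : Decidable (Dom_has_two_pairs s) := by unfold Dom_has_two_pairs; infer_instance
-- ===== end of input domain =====

-- B replaces A's single interleaved scan (dict of last-seen index, gap test inline with early
-- return) by two passes: group all occurrence indices of each 2-char substring into a dict of
-- lists, then look for two ADJACENT occurrences at distance ≥ 2 in any group (objective: alternative).

-- ===== PORT A =====
-- the loop 'for i in range(len(s)-1)' with early return, carrying d : substring ↦ last index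
def loopA (cs : List Char) : List Int → PySem.Dict (List Char) Int → Bool
  | [], _ => false
  | i :: rest, d =>
    let substr := PySem.List.slice cs (some i) (some (i + 2))
    match d.get? substr with
    | some j => if (j - i).natAbs ≥ 2 then true else loopA cs rest (d.insert substr i)
    | none => loopA cs rest (d.insert substr i)

def has_two_pairs (s : String) : Bool :=
  loopA s.toList (PySem.List.pyRange 0 ((s.toList.length : Int) - 1) 1) PySem.Dict.empty

-- ===== PORT B =====
-- first pass: groups.setdefault(s[i:i+2], []).append(i), i.e. modify key [] (· ++ [i])
def buildGroups (cs : List Char) (is : List Int) : PySem.Dict (List Char) (List Int) :=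
  is.foldl (fun g i =>
    g.modify (PySem.List.slice cs (some i) (some (i + 2))) [] (· ++ [i])) PySem.Dict.empty

-- second pass: for a, b in zip(idxs, idxs[1:]): if b - a >= 2: return True
def adjGap (idxs : List Int) : Bool :=
  (idxs.zip (idxs.drop 1)).any (fun p => p.2 - p.1 ≥ 2)

def has_two_pairs_alt (s : String) : Bool :=
  ((buildGroups s.toList (PySem.List.pyRange 0 ((s.toList.length : Int) - 1) 1)).values).any adjGap

-- ===== PRECONDITION & SPEC =====
def Spec_has_two_pairs (s : String) (out : Bool) : Prop := out = has_two_pairs_alt s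
instance (s : String) (out : Bool) : Decidable (Spec_has_two_pairs s out) := by unfold Spec_has_two_pairs; infer_instance

-- ===== CLAIM (what is proved, stated in full; the proofs are below) =====
def Claim_equal_has_two_pairs : Prop := ∀ (s : String), Dom_has_two_pairs s → Spec_has_two_pairs s (has_two_pairs s)

-- ===== LEMMAS AND PROOFS =====

theorem adjGap_cons_cons (a b : Int) (t : List Int) :
    adjGap (a :: b :: t) = (decide (b - a ≥ 2) || adjGap (b :: t)) := rfl

theorem adjGap_append_last (l : List Int) (i : Int) :
    adjGap (l ++ [i]) =
      (adjGap l || (match l.getLast? with | some j => decide (i - j ≥ 2) | none => false)) := by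
  induction l with
  | nil => rfl
  | cons a t ih =>
    cases t with
    | nil => simp [adjGap]
    | cons b t' =>
      rw [List.cons_append] at ih
      rw [List.cons_append, List.cons_append, adjGap_cons_cons, ih, adjGap_cons_cons,
        List.getLast?_cons_cons, Bool.or_assoc]

theorem adjGap_append (l m : List Int) (h : adjGap l = true) : adjGap (l ++ m) = true := by
  induction m generalizing l with
  | nil => simpa using h
  | cons x m' ih =>
    have h1 : adjGap (l ++ [x]) = true := by rw [adjGap_append_last, h, Bool.true_or]
    have h2 := ih (l ++ [x]) h1
    rw [List.append_assoc] at h2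
    simpa using h2

theorem gap_persists (cs : List Char) (is : List Int) (g : PySem.Dict (List Char) (List Int))
    (p : List Char) (hkeys : g.keys.Nodup) (h : adjGap (g.getD p []) = true) :
    (is.foldl (fun g i =>
      g.modify (PySem.List.slice cs (some i) (some (i + 2))) [] (· ++ [i])) g).values.any adjGap
      = true := by
  have key := PySem.Dict.getD_foldl_modify_append
      (is.map (fun i => (PySem.List.slice cs (some i) (some (i + 2)), i))) g p
  rw [List.foldl_map] at key
  simp only [] at key
  have hnd := PySem.Dict.nodup_keys_foldl_modify_key
      (is.map (fun i => (PySem.List.slice cs (some i) (some (i + 2)), i))) Prod.fst []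
      (fun _ q v => v ++ [q.2]) g hkeys
  rw [List.foldl_map] at hnd
  simp only [] at hnd
  have hgap : adjGap ((is.foldl (fun g i =>
      g.modify (PySem.List.slice cs (some i) (some (i + 2))) [] (· ++ [i])) g).getD p [])
      = true := by
    rw [key]; exact adjGap_append _ _ h
  have hne : (is.foldl (fun g i =>
      g.modify (PySem.List.slice cs (some i) (some (i + 2))) [] (· ++ [i])) g).getD p [] ≠ [] := by
    intro he; rw [he] at hgap; exact absurd hgap (by decide)
  have hcont : (is.foldl (fun g i =>
      g.modify (PySem.List.slice cs (some i) (some (i + 2))) [] (· ++ [i])) g).contains p = true := by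
    cases hc : (is.foldl (fun g i =>
        g.modify (PySem.List.slice cs (some i) (some (i + 2))) [] (· ++ [i])) g).contains p with
    | true => rfl
    | false => exact absurd (PySem.Dict.getD_of_not_contains _ [] hc) hne
  rw [PySem.Dict.values_eq_map_keys _ hnd []]
  rw [List.any_eq_true]
  refine ⟨(is.foldl (fun g i =>
      g.modify (PySem.List.slice cs (some i) (some (i + 2))) [] (· ++ [i])) g).getD p [], ?_, hgap⟩
  simp only [List.mem_map]
  exact ⟨p, (PySem.Dict.contains_iff_mem_keys _ p).mp hcont, rfl⟩

theorem loopA_eq_groups (cs : List Char) : ∀ (is : List Int) (d : PySem.Dict (List Char) Int)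
    (g : PySem.Dict (List Char) (List Int)),
    (∀ p, d.get? p = (g.getD p []).getLast?) →
    (∀ p j, j ∈ g.getD p [] → ∀ i ∈ is, j < i) →
    is.Pairwise (· < ·) →
    (∀ p, adjGap (g.getD p []) = false) →
    g.keys.Nodup →
    loopA cs is d = (is.foldl (fun g i =>
      g.modify (PySem.List.slice cs (some i) (some (i + 2))) [] (· ++ [i])) g).values.any adjGap
  | [], d, g, hrel, hmono, hch, hclean, hkeys => by
    rw [List.foldl_nil]
    rw [PySem.Dict.values_eq_map_keys g hkeys []]
    simp only [loopA]
    symm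
    rw [List.any_eq_false]
    intro b hb
    simp only [List.mem_map] at hb
    obtain ⟨k, _, rfl⟩ := hb
    rw [hclean k]
    simp
  | i :: rest, d, g, hrel, hmono, hch, hclean, hkeys => by
    rw [List.foldl_cons]
    have hpw := List.pairwise_cons.mp hch
    have hkeys' : (g.modify (PySem.List.slice cs (some i) (some (i + 2))) [] (· ++ [i])).keys.Nodup := by
      have := PySem.Dict.nodup_keys_foldl_modify_key [i]
        (fun _ => PySem.List.slice cs (some i) (some (i + 2))) [] (fun _ j v => v ++ [j]) g hkeys
      simpa using this
    simp only [loopA]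
    cases hd : d.get? (PySem.List.slice cs (some i) (some (i + 2))) with
    | none =>
      have hnil : g.getD (PySem.List.slice cs (some i) (some (i + 2))) [] = [] := by
        have := hrel (PySem.List.slice cs (some i) (some (i + 2)))
        rw [hd] at this
        exact List.getLast?_eq_none_iff.mp this.symm
      apply loopA_eq_groups cs rest _ _ ?_ ?_ hpw.2 ?_ hkeys'
      · intro q
        rw [PySem.Dict.get?_insert, PySem.Dict.getD_modify]
        by_cases hq : q = PySem.List.slice cs (some i) (some (i + 2))
        · rw [if_pos hq, if_pos hq, hnil, List.nil_append, List.getLast?_singleton]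
        · rw [if_neg hq, if_neg hq]; exact hrel q
      · intro q j hj i' hi'
        rw [PySem.Dict.getD_modify] at hj
        by_cases hq : q = PySem.List.slice cs (some i) (some (i + 2))
        · rw [if_pos hq, hnil, List.nil_append, List.mem_singleton] at hj
          subst hj; exact hpw.1 i' hi'
        · rw [if_neg hq] at hj
          exact hmono q j hj i' (List.mem_cons_of_mem _ hi')
      · intro q
        rw [PySem.Dict.getD_modify]
        by_cases hq : q = PySem.List.slice cs (some i) (some (i + 2))
        · rw [if_pos hq, hnil, List.nil_append]; rfl
        · rw [if_neg hq]; exact hclean q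
    | some j =>
      have hlast : (g.getD (PySem.List.slice cs (some i) (some (i + 2))) []).getLast? = some j := by
        have := hrel (PySem.List.slice cs (some i) (some (i + 2)))
        rw [hd] at this; exact this.symm
      have hji : j < i :=
        hmono _ j (List.mem_of_getLast? hlast) i (List.mem_cons_self)
      show (if (j - i).natAbs ≥ 2 then true
          else loopA cs rest (d.insert (PySem.List.slice cs (some i) (some (i + 2))) i)) = _
      by_cases htr : (j - i).natAbs ≥ 2
      · rw [if_pos htr]
        symm
        apply gap_persists cs rest _ (PySem.List.slice cs (some i) (some (i + 2))) hkeys'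
        rw [PySem.Dict.getD_modify, if_pos rfl, adjGap_append_last,
          hclean (PySem.List.slice cs (some i) (some (i + 2))), hlast, Bool.false_or]
        simp only [decide_eq_true_eq]
        omega
      · rw [if_neg htr]
        apply loopA_eq_groups cs rest _ _ ?_ ?_ hpw.2 ?_ hkeys'
        · intro q
          rw [PySem.Dict.get?_insert, PySem.Dict.getD_modify]
          by_cases hq : q = PySem.List.slice cs (some i) (some (i + 2))
          · rw [if_pos hq, if_pos hq, List.getLast?_concat]
          · rw [if_neg hq, if_neg hq]; exact hrel q
        · intro q j' hj' i' hi'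
          rw [PySem.Dict.getD_modify] at hj'
          by_cases hq : q = PySem.List.slice cs (some i) (some (i + 2))
          · rw [if_pos hq, List.mem_append, List.mem_singleton] at hj'
            cases hj' with
            | inl h => exact lt_trans (hmono _ j' h i (List.mem_cons_self)) (hpw.1 i' hi')
            | inr h => subst h; exact hpw.1 i' hi'
          · rw [if_neg hq] at hj'
            exact hmono q j' hj' i' (List.mem_cons_of_mem _ hi')
        · intro q
          rw [PySem.Dict.getD_modify]
          by_cases hq : q = PySem.List.slice cs (some i) (some (i + 2))
          · rw [if_pos hq, adjGap_append_last, hclean, hlast, Bool.false_or]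
            simp only [decide_eq_false_iff_not]
            omega
          · rw [if_neg hq]; exact hclean q

-- ===== VERDICT (by name: the statement is the Claim_ definition above) =====
theorem has_two_pairs_spec : Claim_equal_has_two_pairs := by
  intro s _
  show has_two_pairs s = has_two_pairs_alt s
  unfold has_two_pairs has_two_pairs_alt buildGroups
  apply loopA_eq_groups
  · intro p; rw [PySem.Dict.get?_empty, PySem.Dict.getD_empty]; rfl
  · intro p j hj; rw [PySem.Dict.getD_empty] at hj; exact absurd hj (List.not_mem_nil)
  · exact PySem.List.pairwise_lt_pyRange_one 0 _
  · intro p; rw [PySem.Dict.getD_empty]; rfl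
  · exact PySem.Dict.nodup_keys_empty
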